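-- pv_equiv track=rewrite | github.com/luigi1256/stronpy | Verticals.py | new_dict
-- ===== SOURCE A (Python) =====
-- def new_dict(list_words:dict):
--    value=list(list_words.values())
--    value.sort()
--    temp_list = []
--    for i in value:
--     if i not in temp_list:
--         temp_list.append(i)
--    new_value = temp_list
--    new_diz={}
--    for value in new_value:
--       for list_x in list(list_words.keys()):
--          if list_words[list_x]==value:
--             new_diz[list_x]=value
--    return new_diz
-- ===== SOURCE B (Python) =====
-- def new_dict(list_words: dict):
--     return dict(sorted(list_words.items(), key=lambda kv: kv[1]))
-- ===== Notes on version B (the rewrite author's own statement) =====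
-- stated objective: simpler
-- what changed: Replaces A's value-sort + dedup + per-distinct-value rescan of all keys by one stable sort of the dict items by value, relying on sort stability for the tie order.
import Mathlib
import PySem

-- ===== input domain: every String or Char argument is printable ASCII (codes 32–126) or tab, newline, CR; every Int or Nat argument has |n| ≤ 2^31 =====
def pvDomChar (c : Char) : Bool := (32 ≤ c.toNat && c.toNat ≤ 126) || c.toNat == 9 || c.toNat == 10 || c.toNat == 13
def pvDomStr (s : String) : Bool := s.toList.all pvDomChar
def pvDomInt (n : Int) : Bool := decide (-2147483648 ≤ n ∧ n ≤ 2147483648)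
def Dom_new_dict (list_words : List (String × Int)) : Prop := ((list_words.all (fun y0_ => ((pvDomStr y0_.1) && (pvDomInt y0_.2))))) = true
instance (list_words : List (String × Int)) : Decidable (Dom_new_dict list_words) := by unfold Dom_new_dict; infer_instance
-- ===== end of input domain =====

-- B replaces A's value-sort + dedup + per-distinct-value rescan of all keys by ONE stable sort
-- of the dict items by value (objective: simpler; one stable sort instead of the dedup + rescan loops).


-- ===== PORT A =====
-- The Python parameter is a dict; both ports reconstruct the dict value from the association
-- list with PySem.Dict.ofList and then follow their Python line by line.
def new_dict (list_words : List (String × Int)) : List (String × Int) :=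
  let d := PySem.Dict.ofList list_words
  -- value = list(list_words.values()); value.sort()
  let value := PySem.List.sorted (PySem.Dict.values d) (fun v => v) false
  -- temp_list = []; for i in value: if i not in temp_list: temp_list.append(i)
  let temp_list := value.foldl (fun acc i => if acc.contains i then acc else acc ++ [i]) ([] : List Int)
  let new_value := temp_list
  -- new_diz = {}; for value in new_value: for list_x in list(list_words.keys()):
  --   if list_words[list_x] == value: new_diz[list_x] = value
  -- (list_x is always a key of the dict, so d[list_x] is get? d list_x = some _)
  let new_diz := new_value.foldl (fun nd v =>
      (PySem.Dict.keys d).foldl (fun nd list_x =>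
        if PySem.Dict.get? d list_x = some v then nd.insert list_x v else nd) nd)
    (PySem.Dict.empty : PySem.Dict String Int)
  new_diz.items

-- ===== PORT B =====
-- return dict(sorted(list_words.items(), key=lambda kv: kv[1]))
def new_dict_alt (list_words : List (String × Int)) : List (String × Int) :=
  let d := PySem.Dict.ofList list_words
  (PySem.Dict.ofList (PySem.List.sorted d.items (fun kv => kv.2) false)).items

-- ===== PRECONDITION & SPEC =====
def Spec_new_dict (list_words : List (String × Int)) (out : List (String × Int)) : Prop := out = new_dict_alt list_words
instance (list_words : List (String × Int)) (out : List (String × Int)) : Decidable (Spec_new_dict list_words out) := by unfold Spec_new_dict; infer_instance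

-- ===== CLAIM (what is proved, stated in full; the proofs are below) =====
def Claim_equal_new_dict : Prop := ∀ (list_words : List (String × Int)), Dom_new_dict list_words → Spec_new_dict list_words (new_dict list_words)

-- ===== LEMMAS AND PROOFS =====

-- the block of pairs carrying value v, in original order
def gBlock (l : List (String × Int)) (v : Int) : List (String × Int) :=
  l.filter (fun p => p.2 == v)

-- the distinct values in A's processing order: dedup of the sorted value list
def vsOf (l : List (String × Int)) : List Int :=
  PySem.Set.ofList (PySem.List.sorted (l.map Prod.snd) (fun v => v) false)

-- the common normal form: blocks of equal-value pairs, by increasing value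
def grouped (l : List (String × Int)) : List (String × Int) :=
  (vsOf l).flatMap (gBlock l)

theorem ofList_sublist {α : Type} [BEq α] [LawfulBEq α] (m : List α) :
    (PySem.Set.ofList m).Sublist m := by
  induction m using List.reverseRecOn with
  | nil => simp [PySem.Set.ofList, PySem.Set.empty]
  | append_singleton xs x ih =>
    rw [PySem.Set.ofList_append_singleton]
    by_cases hx : x ∈ PySem.Set.ofList xs
    · rw [PySem.Set.add_of_mem hx]
      exact ih.trans (List.sublist_append_left xs [x])
    · rw [PySem.Set.add_of_not_mem hx]
      exact ih.append (List.Sublist.refl [x])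

theorem vsOf_pairwise (l : List (String × Int)) : (vsOf l).Pairwise (· < ·) := by
  have hle : (PySem.List.sorted (l.map Prod.snd) (fun v => v) false).Pairwise (fun a b => a ≤ b) :=
    PySem.List.sorted_pairwise _ _
  have hsub := ofList_sublist (PySem.List.sorted (l.map Prod.snd) (fun v => v) false)
  have h1 : (vsOf l).Pairwise (fun a b => a ≤ b) := hle.sublist hsub
  have h2 : (vsOf l).Nodup := PySem.Set.nodup_ofList _
  exact (h1.and h2).imp (fun h => lt_of_le_of_ne h.1 h.2)

theorem mem_vsOf (l : List (String × Int)) (v : Int) : v ∈ vsOf l ↔ v ∈ l.map Prod.snd := by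
  unfold vsOf
  rw [PySem.Set.mem_ofList, PySem.List.mem_sorted]

theorem strict_sorted_unique (u w : List Int)
    (hu : u.Pairwise (· < ·)) (hw : w.Pairwise (· < ·))
    (h : ∀ v, v ∈ u ↔ v ∈ w) : u = w := by
  have hnu : u.Nodup := hu.imp ne_of_lt
  have hnw : w.Nodup := hw.imp ne_of_lt
  have hperm : u.Perm w := (List.perm_ext_iff_of_nodup hnu hnw).mpr h
  exact hperm.eq_of_sorted (fun a b _ _ h1 h2 => le_antisymm h1 h2)
    (hu.imp le_of_lt) (hw.imp le_of_lt)

theorem split3 (c : Int) : ∀ (vs : List Int), vs.Pairwise (· < ·) →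
    vs = vs.filter (fun v => decide (v < c)) ++ vs.filter (fun v => decide (v = c))
        ++ vs.filter (fun v => decide (c < v))
  | [], _ => by simp
  | a :: vs, hp => by
    rcases List.pairwise_cons.mp hp with ⟨ha, hp'⟩
    rcases lt_trichotomy a c with h | h | h
    · rw [List.filter_cons_of_pos (by simpa using h),
        List.filter_cons_of_neg (by simp; omega),
        List.filter_cons_of_neg (by simp; omega)]
      simp only [List.cons_append]
      exact congrArg (List.cons a) (split3 c vs hp')
    · subst h
      have h1 : vs.filter (fun v => decide (v < a)) = [] :=
        List.filter_eq_nil_iff.mpr (fun v hv => by have := ha v hv; simp; omega)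
      have h2 : vs.filter (fun v => decide (v = a)) = [] :=
        List.filter_eq_nil_iff.mpr (fun v hv => by have := ha v hv; simp; omega)
      have h3 : vs.filter (fun v => decide (a < v)) = vs :=
        List.filter_eq_self.mpr (fun v hv => by have := ha v hv; simpa using this)
      rw [List.filter_cons_of_neg (by simp), List.filter_cons_of_pos (by simp),
        List.filter_cons_of_neg (by simp), h1, h2, h3]
      simp
    · have h1 : vs.filter (fun v => decide (v < c)) = [] :=
        List.filter_eq_nil_iff.mpr (fun v hv => by have := ha v hv; simp; omega)
      have h2 : vs.filter (fun v => decide (v = c)) = [] :=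
        List.filter_eq_nil_iff.mpr (fun v hv => by have := ha v hv; simp; omega)
      have h3 : vs.filter (fun v => decide (c < v)) = vs :=
        List.filter_eq_self.mpr (fun v hv => by have := ha v hv; simp; omega)
      rw [List.filter_cons_of_neg (by simp; omega), List.filter_cons_of_neg (by simp; omega),
        List.filter_cons_of_pos (by simpa using h), h1, h2, h3]
      simp

theorem filter_eq_single : ∀ {vs : List Int} (c : Int), vs.Nodup → c ∈ vs →
    vs.filter (fun v => decide (v = c)) = [c]
  | [], c, _, hc => absurd hc (by simp)
  | a :: vs, c, hnd, hc => by
    rcases List.nodup_cons.mp hnd with ⟨ha, hnd'⟩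
    by_cases h : a = c
    · subst h
      have h2 : vs.filter (fun v => decide (v = a)) = [] :=
        List.filter_eq_nil_iff.mpr (fun v hv => by
          intro hva
          rw [decide_eq_true_eq] at hva
          exact ha (hva ▸ hv))
      rw [List.filter_cons_of_pos (by simp), h2]
    · rw [List.filter_cons_of_neg (by simpa using h)]
      rcases List.mem_cons.mp hc with h' | h'
      · exact absurd h'.symm h
      · exact filter_eq_single c hnd' h'

theorem insertBy_append_not_before {α : Type} (before : α → α → Bool) (x : α) :
    ∀ (ys zs : List α), (∀ y ∈ ys, before x y = false) →
    PySem.List.insertBy before x (ys ++ zs) = ys ++ PySem.List.insertBy before x zs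
  | [], zs, _ => by simp
  | y :: ys, zs, h => by
    simp only [List.cons_append, PySem.List.insertBy]
    rw [h y (by simp)]
    simp only [Bool.false_eq_true, if_false]
    rw [insertBy_append_not_before before x ys zs (fun y hy => h y (by simp [hy]))]

theorem insertBy_middle {α : Type} (before : α → α → Bool) (x : α) (ys zs : List α)
    (h1 : ∀ y ∈ ys, before x y = false) (h2 : ∀ z ∈ zs, before x z = true) :
    PySem.List.insertBy before x (ys ++ zs) = ys ++ x :: zs := by
  rw [insertBy_append_not_before before x ys zs h1]
  cases zs with
  | nil => simp [PySem.List.insertBy]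
  | cons z zs => simp [PySem.List.insertBy, h2 z (by simp)]

theorem pair_eq_of_fst : ∀ {l : List (String × Int)}, (l.map Prod.fst).Nodup →
    ∀ {p q : String × Int}, p ∈ l → q ∈ l → p.1 = q.1 → p = q
  | [], _, _, _, hp, _, _ => absurd hp (by simp)
  | a :: l, hnd, p, q, hp, hq, h => by
    rw [List.map_cons] at hnd
    rcases List.nodup_cons.mp hnd with ⟨ha, hnd'⟩
    rcases List.mem_cons.mp hp with rfl | hp'
    · rcases List.mem_cons.mp hq with rfl | hq'
      · rfl
      · exact absurd (by rw [h]; exact List.mem_map_of_mem hq' (f := Prod.fst)) ha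
    · rcases List.mem_cons.mp hq with rfl | hq'
      · exact absurd (by rw [← h]; exact List.mem_map_of_mem hp' (f := Prod.fst)) ha
      · exact pair_eq_of_fst hnd' hp' hq' h

-- mem of a flatMap of blocks: every element's value lies in the value list
theorem snd_mem_of_mem_flatMap {l : List (String × Int)} {vs : List Int} {y : String × Int}
    (hy : y ∈ vs.flatMap (gBlock l)) : y.2 ∈ vs ∧ y ∈ l := by
  rcases List.mem_flatMap.mp hy with ⟨v, hv, hyv⟩
  rcases List.mem_filter.mp hyv with ⟨hyl, hval⟩
  have : y.2 = v := by simpa using hval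
  exact ⟨this ▸ hv, hyl⟩

theorem gBlock_append (l : List (String × Int)) (x : String × Int) (v : Int) :
    gBlock (l ++ [x]) v = gBlock l v ++ if x.2 = v then [x] else [] := by
  unfold gBlock
  rw [List.filter_append]
  congr 1
  by_cases h : x.2 = v <;> simp [h]

-- the core stability fact: sorting the pairs by value equals the grouped normal form
theorem stable_sort_grouped : ∀ l : List (String × Int),
    PySem.List.sorted l (fun p => p.2) false = grouped l := by
  intro l
  induction l using List.reverseRecOn with
  | nil => simp [grouped, vsOf, PySem.List.sorted, PySem.Set.ofList, PySem.Set.empty]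
  | append_singleton l x ih =>
    have hs : PySem.List.sorted (l ++ [x]) (fun p : String × Int => p.2) false
        = PySem.List.insertBy (fun a b => decide (a.2 < b.2)) x
            (PySem.List.sorted l (fun p => p.2) false) := by
      rw [PySem.List.sorted_eq_foldl_insertBy, PySem.List.sorted_eq_foldl_insertBy,
        List.foldl_append]
      rfl
    rw [hs, ih]
    set c := x.2 with hc
    set vs := vsOf l with hvs
    set A := vs.filter (fun v => decide (v < c)) with hA
    set M := vs.filter (fun v => decide (v = c)) with hM
    set B := vs.filter (fun v => decide (c < v)) with hB
    have hsplit : vs = A ++ M ++ B := split3 c vs (vsOf_pairwise l)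
    -- left side: insert x after the blocks with value ≤ c
    have hleft : PySem.List.insertBy (fun a b => decide (a.2 < b.2)) x (grouped l)
        = (A ++ M).flatMap (gBlock l) ++ x :: B.flatMap (gBlock l) := by
      have hgl : grouped l = (A ++ M).flatMap (gBlock l) ++ B.flatMap (gBlock l) := by
        unfold grouped
        rw [← hvs, hsplit]
        simp [List.flatMap_append]
      rw [hgl]
      apply insertBy_middle
      · intro y hy
        rcases snd_mem_of_mem_flatMap hy with ⟨hyv, _⟩
        rcases List.mem_append.mp hyv with h | h
        · have := (List.mem_filter.mp h).2; simp at this ⊢; omega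
        · have := (List.mem_filter.mp h).2; simp at this ⊢; omega
      · intro z hz
        rcases snd_mem_of_mem_flatMap hz with ⟨hzv, _⟩
        have := (List.mem_filter.mp hzv).2; simp at this ⊢; omega
    rw [hleft]
    -- right side: the value list of l ++ [x] is A ++ c :: B
    have hvs' : vsOf (l ++ [x]) = A ++ c :: B := by
      apply strict_sorted_unique _ _ (vsOf_pairwise _)
      · rw [List.pairwise_append]
        refine ⟨(vsOf_pairwise l).sublist (hA ▸ List.filter_sublist (l := vs)), ?_, ?_⟩
        · rw [List.pairwise_cons]
          exact ⟨fun b hb => by have := (List.mem_filter.mp (hB ▸ hb)).2; simpa using this,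
            (vsOf_pairwise l).sublist (hB ▸ List.filter_sublist (l := vs))⟩
        · intro a ha y hy
          have ha' := (List.mem_filter.mp (hA ▸ ha)).2
          simp only [decide_eq_true_eq] at ha'
          rcases List.mem_cons.mp hy with rfl | hy'
          · exact ha'
          · have := (List.mem_filter.mp (hB ▸ hy')).2
            simp only [decide_eq_true_eq] at this
            omega
      · intro v
        rw [mem_vsOf]
        constructor
        · intro hv
          have hv2 : v ∈ List.map Prod.snd l ∨ v = c := by simpa [hc] using hv
          rcases hv2 with hv2 | rfl
          · have hv' : v ∈ vs := hvs ▸ (mem_vsOf l v).mpr hv2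
            rcases lt_trichotomy v c with h | h | h
            · exact List.mem_append.mpr (Or.inl (hA ▸ List.mem_filter.mpr ⟨hv', by simpa using h⟩))
            · exact List.mem_append.mpr (Or.inr (List.mem_cons.mpr (Or.inl h)))
            · exact List.mem_append.mpr (Or.inr (List.mem_cons.mpr (Or.inr
                (hB ▸ List.mem_filter.mpr ⟨hv', by simpa using h⟩))))
          · exact List.mem_append.mpr (Or.inr (List.mem_cons.mpr (Or.inl rfl)))
        · intro hv
          have hv2 : v ∈ List.map Prod.snd l ∨ v = c := by
            rcases List.mem_append.mp hv with h | h
            · exact Or.inl ((mem_vsOf l v).mp (hvs ▸ (List.filter_sublist (l := vs)).mem (hA ▸ h)))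
            · rcases List.mem_cons.mp h with rfl | h
              · exact Or.inr rfl
              · exact Or.inl ((mem_vsOf l v).mp (hvs ▸ (List.filter_sublist (l := vs)).mem (hB ▸ h)))
          rcases hv2 with h | rfl
          · simp [h]
          · simp [hc]
    -- the M-blocks amount to exactly gBlock l c
    have hMg : M.flatMap (gBlock l) = gBlock l c := by
      by_cases hcv : c ∈ vs
      · rw [hM, filter_eq_single c ((vsOf_pairwise l).imp ne_of_lt) (hvs ▸ hcv)]
        simp
      · have hMnil : M = [] := hM ▸ List.filter_eq_nil_iff.mpr
          (fun v hv => by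
            intro hvc
            rw [decide_eq_true_eq] at hvc
            exact hcv (hvc ▸ hv))
        have hgnil : gBlock l c = [] := List.filter_eq_nil_iff.mpr
          (fun p hp => by
            intro hpc
            rw [beq_iff_eq] at hpc
            exact hcv (hvs ▸ (mem_vsOf l c).mpr (by
              rw [← hpc]; exact List.mem_map_of_mem hp (f := Prod.snd))))
        simp [hMnil, hgnil]
    have hgA : A.flatMap (gBlock (l ++ [x])) = A.flatMap (gBlock l) := by
      apply List.flatMap_congr
      intro v hv
      have := (List.mem_filter.mp (hA ▸ hv)).2
      simp only [decide_eq_true_eq] at this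
      rw [gBlock_append]
      simp [show ¬ (x.2 = v) by omega]
    have hgB : B.flatMap (gBlock (l ++ [x])) = B.flatMap (gBlock l) := by
      apply List.flatMap_congr
      intro v hv
      have := (List.mem_filter.mp (hB ▸ hv)).2
      simp only [decide_eq_true_eq] at this
      rw [gBlock_append]
      simp [show ¬ (x.2 = v) by omega]
    have hgc : gBlock (l ++ [x]) c = gBlock l c ++ [x] := by
      rw [gBlock_append]; simp [hc]
    have hR : (A ++ c :: B).flatMap (gBlock (l ++ [x]))
        = A.flatMap (gBlock l) ++ (gBlock l c ++ [x]) ++ B.flatMap (gBlock l) := by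
      rw [List.flatMap_append, List.flatMap_cons, hgA, hgB, hgc]
      simp [List.append_assoc]
    unfold grouped
    rw [hvs', hR, List.flatMap_append, hMg]
    simp

-- a dict built from a duplicate-free association list has exactly that items list
theorem items_ofList_of_nodup (ps : List (String × Int)) (hnd : (ps.map Prod.fst).Nodup) :
    (PySem.Dict.ofList ps).items = ps := by
  have h := PySem.Dict.items_foldl_insert_fresh ps Prod.fst Prod.snd
    (PySem.Dict.empty : PySem.Dict String Int)
    (fun a _ => PySem.Dict.contains_empty (ν := Int) a.1) hnd
  simpa [PySem.Dict.ofList, PySem.Dict.update, PySem.Dict.empty] using h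

-- A's double loop, characterised: it appends the blocks of each processed value
theorem A_fold (d : PySem.Dict String Int) (hk : d.keys.Nodup) :
    ∀ (vs : List Int), vs.Nodup → ∀ (nd : PySem.Dict String Int),
    (∀ p ∈ d.items, p.2 ∈ vs → nd.contains p.1 = false) →
    (vs.foldl (fun nd v =>
        (PySem.Dict.keys d).foldl (fun nd list_x =>
          if PySem.Dict.get? d list_x = some v then nd.insert list_x v else nd) nd) nd).items
      = nd.items ++ vs.flatMap (gBlock d.items)
  | [], _, nd, _ => by simp
  | v :: vs, hnd, nd, hfresh => by
    rcases List.nodup_cons.mp hnd with ⟨hvne, hnd'⟩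
    have hkeys : d.keys = d.items.map Prod.fst := rfl
    -- turn the inner key loop into an insert loop over the block of value v
    have hinner : (PySem.Dict.keys d).foldl (fun nd list_x =>
          if PySem.Dict.get? d list_x = some v then nd.insert list_x v else nd) nd
        = (gBlock d.items v).foldl (fun nd p => nd.insert p.1 p.2) nd := by
      rw [hkeys, List.foldl_map]
      rw [PySem.List.foldl_congr_mem d.items _
        (fun nd p => if p.2 == v then nd.insert p.1 p.2 else nd) nd
        (fun acc p hp => by
          have hget : PySem.Dict.get? d p.1 = some p.2 :=
            PySem.Dict.get?_of_mem_items d hp hk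
          by_cases h : p.2 = v
          · simp [hget, h]
          · simp [hget, h])]
      exact PySem.List.foldl_if_eq_foldl_filter _ _ _ _
    have hfreshv : ∀ a ∈ gBlock d.items v, nd.contains a.1 = false :=
      fun a ha => hfresh a (List.mem_of_mem_filter ha) (by
        have := (List.mem_filter.mp ha).2; simp at this; simp [this])
    have hndblock : ((gBlock d.items v).map Prod.fst).Nodup :=
      (hkeys ▸ hk).sublist ((List.filter_sublist (l := d.items)).map Prod.fst)
    have hitems : ((gBlock d.items v).foldl (fun nd p => nd.insert p.1 p.2) nd).items
        = nd.items ++ gBlock d.items v := by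
      rw [PySem.Dict.items_foldl_insert_fresh (gBlock d.items v) Prod.fst Prod.snd nd
        hfreshv hndblock]
      simp
    rw [List.foldl_cons, hinner]
    rw [A_fold d hk vs hnd' _ (fun p hp hpv => by
      -- keys inserted so far carry values outside vs
      have hkeys' : ((gBlock d.items v).foldl (fun nd p => nd.insert p.1 p.2) nd).keys
          = nd.items.map Prod.fst ++ (gBlock d.items v).map Prod.fst := by
        show (((gBlock d.items v).foldl (fun nd p => nd.insert p.1 p.2) nd).items).map Prod.fst = _
        rw [hitems, List.map_append]
      by_contra hcon
      have htrue : ((gBlock d.items v).foldl (fun nd p => nd.insert p.1 p.2) nd).contains p.1 = true := by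
        revert hcon; cases h : ((gBlock d.items v).foldl (fun nd p => nd.insert p.1 p.2) nd).contains p.1 <;> simp
      have hmemk : p.1 ∈ nd.items.map Prod.fst ++ (gBlock d.items v).map Prod.fst := by
        rw [← hkeys']
        exact (PySem.Dict.contains_iff_mem_keys _ p.1).mp htrue
      rcases List.mem_append.mp hmemk with h | h
      · have hfalse : nd.contains p.1 = false := hfresh p hp (by simp [hpv])
        have htrue2 : nd.contains p.1 = true := (PySem.Dict.contains_iff_mem_keys nd p.1).mpr h
        simp [hfalse] at htrue2
      · rcases List.mem_map.mp h with ⟨q, hq, hq1⟩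
        have hqv : q.2 = v := by have := (List.mem_filter.mp hq).2; simpa using this
        have hqp : q = p := pair_eq_of_fst (hkeys ▸ hk) (List.mem_of_mem_filter hq) hp hq1
        have hpv2 : p.2 = v := by rw [← hqp]; exact hqv
        exact hvne (hpv2 ▸ hpv))]
    rw [hitems]
    simp [List.flatMap_cons]

-- A computes the grouped normal form of the dict's items
theorem new_dict_eq_grouped (lw : List (String × Int)) :
    new_dict lw = grouped (PySem.Dict.ofList lw).items := by
  have hk : (PySem.Dict.ofList lw).keys.Nodup := PySem.Dict.nodup_keys_ofList lw
  have h := A_fold (PySem.Dict.ofList lw) hk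
    (PySem.Set.ofList (PySem.List.sorted ((PySem.Dict.ofList lw).items.map Prod.snd) (fun v => v) false))
    (PySem.Set.nodup_ofList _) PySem.Dict.empty
    (fun p _ _ => PySem.Dict.contains_empty (ν := Int) p.1)
  show ((PySem.Set.ofList (PySem.List.sorted ((PySem.Dict.ofList lw).items.map Prod.snd) (fun v => v) false)).foldl
      (fun nd v => (PySem.Dict.keys (PySem.Dict.ofList lw)).foldl (fun nd list_x =>
        if PySem.Dict.get? (PySem.Dict.ofList lw) list_x = some v then nd.insert list_x v else nd) nd)
      PySem.Dict.empty).items = grouped (PySem.Dict.ofList lw).items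
  rw [h]
  simp [grouped, vsOf, PySem.Dict.empty]

-- B computes the stable sort of the dict's items
theorem new_dict_alt_eq_sorted (lw : List (String × Int)) :
    new_dict_alt lw = PySem.List.sorted (PySem.Dict.ofList lw).items (fun p => p.2) false := by
  have hk : (PySem.Dict.ofList lw).keys.Nodup := PySem.Dict.nodup_keys_ofList lw
  have hperm : ((PySem.List.sorted (PySem.Dict.ofList lw).items (fun p : String × Int => p.2) false).map Prod.fst).Perm
      ((PySem.Dict.ofList lw).items.map Prod.fst) :=
    (PySem.List.sorted_perm (PySem.Dict.ofList lw).items (fun p => p.2) false).map _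
  have hnd : ((PySem.List.sorted (PySem.Dict.ofList lw).items (fun p : String × Int => p.2) false).map Prod.fst).Nodup :=
    (hperm.nodup_iff).mpr hk
  exact items_ofList_of_nodup _ hnd

-- ===== VERDICT (by name: the statement is the Claim_ definition above) =====
theorem new_dict_spec : Claim_equal_new_dict := by
  intro lw _
  unfold Spec_new_dict
  rw [new_dict_eq_grouped, new_dict_alt_eq_sorted, stable_sort_grouped]
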